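-- pv_equiv track=rewrite | github.com/wilmurillo-ai/Design-Assistant | .skills/openclaw-skills/skills/stoneyhoo/lobsterai-security/dependency_scanner.py | _calculate_threat_level
-- ===== SOURCE A (Python) =====
-- from typing import Dict, List, Tuple, Optional, Set, Any
--
-- def _calculate_threat_level(vulnerabilities: List[Dict[str, Any]]) -> str:
--     """计算威胁等级"""
--     if not vulnerabilities:
--         return 'safe'
--
--     severities = [v['severity'] for v in vulnerabilities]
--     if 'critical' in severities:
--         return 'critical'
--     if 'high' in severities:
--         return 'high'
--     if 'medium' in severities:
--         return 'medium'
--     return 'low'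
-- ===== SOURCE B (Python) =====
-- def _calculate_threat_level(vulnerabilities):
--     if not vulnerabilities:
--         return 'safe'
--     rank = {'critical': 4, 'high': 3, 'medium': 2}
--     m = 1
--     for v in vulnerabilities:
--         m = max(m, rank.get(v['severity'], 1))
--     return {4: 'critical', 3: 'high', 2: 'medium'}.get(m, 'low')
-- ===== Notes on version B (the rewrite author's own statement) =====
-- stated objective: alternative
-- what changed: Replaces the three-pass membership chain over a materialized severities list with a single fold that tracks the maximum severity rank and maps it back to a label at the end.
import Mathlib
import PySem

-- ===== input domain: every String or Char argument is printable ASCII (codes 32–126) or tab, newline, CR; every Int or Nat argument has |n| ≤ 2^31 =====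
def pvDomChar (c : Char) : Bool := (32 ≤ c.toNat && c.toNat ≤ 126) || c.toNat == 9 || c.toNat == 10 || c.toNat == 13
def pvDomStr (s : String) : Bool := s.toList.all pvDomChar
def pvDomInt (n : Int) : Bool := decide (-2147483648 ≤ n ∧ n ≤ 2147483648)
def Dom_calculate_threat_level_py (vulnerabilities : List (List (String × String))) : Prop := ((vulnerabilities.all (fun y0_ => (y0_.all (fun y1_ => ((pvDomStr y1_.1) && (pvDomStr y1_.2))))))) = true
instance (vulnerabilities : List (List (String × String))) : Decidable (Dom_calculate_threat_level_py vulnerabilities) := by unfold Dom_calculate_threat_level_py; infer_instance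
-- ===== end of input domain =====

-- B replaces A's three-pass membership chain over a severities list by a single
-- fold tracking the maximum severity rank; equal on all inputs where A returns.

-- v['severity'] : first-match association-list lookup; the "" default is never
-- taken under Pre_ (Python raises KeyError exactly when the key is absent).
def pvSev (v : List (String × String)) : String :=
  ((v.find? (fun p => p.1 == "severity")).map Prod.snd).getD ""

-- ===== PORT A =====
def calculate_threat_level_py (vulnerabilities : List (List (String × String))) : String :=
  if vulnerabilities = [] then "safe"
  else
    let severities := vulnerabilities.map pvSev
    if severities.contains "critical" then "critical"
    else if severities.contains "high" then "high"
    else if severities.contains "medium" then "medium"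
    else "low"

-- ===== PORT B =====
def pvRank (s : String) : Int :=
  if s = "critical" then 4 else if s = "high" then 3 else if s = "medium" then 2 else 1

def calculate_threat_level_py_alt (vulnerabilities : List (List (String × String))) : String :=
  if vulnerabilities = [] then "safe"
  else
    let m := vulnerabilities.foldl (fun acc v => max acc (pvRank (pvSev v))) 1
    if m = 4 then "critical" else if m = 3 then "high" else if m = 2 then "medium" else "low"

-- ===== PRECONDITION & SPEC =====
-- Pre_ excludes exactly the inputs where some dict lacks the 'severity' key: there
-- Python A raises KeyError (and B raises too), so no value is claimed.
def Pre_calculate_threat_level_py (vulnerabilities : List (List (String × String))) : Prop :=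
  (vulnerabilities.all (fun v => v.any (fun p => p.1 == "severity"))) = true
instance (vulnerabilities : List (List (String × String))) : Decidable (Pre_calculate_threat_level_py vulnerabilities) := by unfold Pre_calculate_threat_level_py; infer_instance

def pvWitness_calculate_threat_level_py : (List (List (String × String))) :=
  [[("severity", "high")], [("severity", "odd"), ("id", "x")]]

def Spec_calculate_threat_level_py (vulnerabilities : List (List (String × String))) (out : String) : Prop := out = calculate_threat_level_py_alt vulnerabilities
instance (vulnerabilities : List (List (String × String))) (out : String) : Decidable (Spec_calculate_threat_level_py vulnerabilities out) := by unfold Spec_calculate_threat_level_py; infer_instance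

-- ===== CLAIM (what is proved, stated in full; the proofs are below) =====
def Claim_equal_calculate_threat_level_py : Prop := ∀ (vulnerabilities : List (List (String × String))), Dom_calculate_threat_level_py vulnerabilities → Pre_calculate_threat_level_py vulnerabilities → Spec_calculate_threat_level_py vulnerabilities (calculate_threat_level_py vulnerabilities)

-- ===== LEMMAS AND PROOFS =====

-- A's if-chain, on an arbitrary severities list (the nonempty guard factored out).
def pvChain (l : List String) : String :=
  if l.contains "critical" then "critical"
  else if l.contains "high" then "high"
  else if l.contains "medium" then "medium"
  else "low"

theorem pvRank_ge_one (s : String) : 1 ≤ pvRank s := by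
  unfold pvRank; split_ifs <;> omega

theorem pvFoldl_max_shift (l : List (List (String × String))) (a b : Int) :
    l.foldl (fun acc v => max acc (pvRank (pvSev v))) (max a b)
      = max a (l.foldl (fun acc v => max acc (pvRank (pvSev v))) b) := by
  induction l generalizing b with
  | nil => simp
  | cons h t ih =>
      simp only [List.foldl_cons]
      rw [max_assoc, ih]

theorem pvChain_le4 (l : List String) : pvRank (pvChain l) ≤ 4 := by
  unfold pvChain; split_ifs <;> decide

theorem pvChain_le3 (l : List String) (h : "critical" ∉ l) :
    pvRank (pvChain l) ≤ 3 := by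
  unfold pvChain
  rw [if_neg (by simpa using h)]
  split_ifs <;> decide

theorem pvChain_le2 (l : List String) (hc : "critical" ∉ l)
    (hh : "high" ∉ l) : pvRank (pvChain l) ≤ 2 := by
  unfold pvChain
  rw [if_neg (by simpa using hc), if_neg (by simpa using hh)]
  split_ifs <;> decide

theorem pvChain_cons (s : String) (l : List String) :
    pvRank (pvChain (s :: l)) = max (pvRank s) (pvRank (pvChain l)) := by
  by_cases h1 : s = "critical"
  · subst h1
    rw [show pvChain ("critical" :: l) = "critical" from by simp [pvChain]]
    have h := pvChain_le4 l
    have : pvRank "critical" = 4 := by decide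
    omega
  have h1' : "critical" ≠ s := fun h => h1 h.symm
  by_cases h2 : s = "high"
  · subst h2
    by_cases hc : "critical" ∈ l
    · rw [show pvChain ("high" :: l) = "critical" from by simp [pvChain, hc],
          show pvChain l = "critical" from by simp [pvChain, hc]]
      decide
    · rw [show pvChain ("high" :: l) = "high" from by simp [pvChain, hc, h1']]
      have h := pvChain_le3 l hc
      have hg := pvRank_ge_one (pvChain l)
      have : pvRank "high" = 3 := by decide
      omega
  have h2' : "high" ≠ s := fun h => h2 h.symm
  by_cases h3 : s = "medium"
  · subst h3
    by_cases hc : "critical" ∈ l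
    · rw [show pvChain ("medium" :: l) = "critical" from by simp [pvChain, hc],
          show pvChain l = "critical" from by simp [pvChain, hc]]
      decide
    by_cases hh : "high" ∈ l
    · rw [show pvChain ("medium" :: l) = "high" from by simp [pvChain, hc, hh, h1'],
          show pvChain l = "high" from by simp [pvChain, hc, hh]]
      decide
    · rw [show pvChain ("medium" :: l) = "medium" from by
        simp [pvChain, hc, hh, h1', h2']]
      have h := pvChain_le2 l hc hh
      have hg := pvRank_ge_one (pvChain l)
      have : pvRank "medium" = 2 := by decide
      omega
  have h3' : "medium" ≠ s := fun h => h3 h.symm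
  have hchain : pvChain (s :: l) = pvChain l := by
    unfold pvChain
    simp [h1', h2', h3']
  rw [hchain]
  have hs : pvRank s = 1 := by unfold pvRank; simp [h1, h2, h3]
  have hg := pvRank_ge_one (pvChain l)
  omega

theorem pvFold_eq_rank_chain (l : List (List (String × String))) :
    l.foldl (fun acc v => max acc (pvRank (pvSev v))) 1 = pvRank (pvChain (l.map pvSev)) := by
  induction l with
  | nil => simp [pvChain, pvRank]
  | cons h t ih =>
      simp only [List.foldl_cons, List.map_cons]
      rw [pvChain_cons]
      have h1 : (1 : Int) ≤ pvRank (pvSev h) := pvRank_ge_one _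
      have : max (1 : Int) (pvRank (pvSev h)) = max (pvRank (pvSev h)) 1 := max_comm _ _
      rw [this, pvFoldl_max_shift, ih]

theorem pvBack_rank_chain (l : List String) :
    (if pvRank (pvChain l) = 4 then "critical"
     else if pvRank (pvChain l) = 3 then "high"
     else if pvRank (pvChain l) = 2 then "medium" else "low") = pvChain l := by
  unfold pvChain
  split_ifs <;> simp_all [pvRank]

-- ===== VERDICT (by name: the statement is the Claim_ definition above) =====
theorem calculate_threat_level_py_spec : Claim_equal_calculate_threat_level_py := by
  intro vulns _ _
  unfold Spec_calculate_threat_level_py calculate_threat_level_py calculate_threat_level_py_alt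
  by_cases hnil : vulns = []
  · simp [hnil]
  · simp only [hnil, if_false]
    rw [pvFold_eq_rank_chain, pvBack_rank_chain]
    rfl
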